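-- pv_equiv track=rewrite | github.com/FlickerSoul/MiniPythonCompiler | tests/scope.py | f
-- ===== SOURCE A (Python) =====
-- def f(x : int) -> int:
--     y : int = x*x
--     x : bool = x*x > 42
--     while x:
--         y -= 1
--         if y % 2 == 1:
--             x : int = y // 2
--             y -= x
--         else:
--             y = y // 2
--         x = y > 10
--     return y
-- ===== SOURCE B (Python) =====
-- def f(x: int) -> int:
--     y = x * x
--     if y <= 42:
--         return y
--     k = y.bit_length() - 4
--     v = y >> k
--     return v if v <= 10 else v >> 1
-- ===== Notes on version B (the rewrite author's own statement) =====
-- stated objective: alternative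
-- what changed: A repeatedly floor-halves y=x*x in a loop until the value drops to the threshold; B has no loop: it computes the shift exponent in closed form from y.bit_length() (bit_length minus 4, corrected by one when the shifted value still exceeds the threshold) and returns a single shift.
import Mathlib
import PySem

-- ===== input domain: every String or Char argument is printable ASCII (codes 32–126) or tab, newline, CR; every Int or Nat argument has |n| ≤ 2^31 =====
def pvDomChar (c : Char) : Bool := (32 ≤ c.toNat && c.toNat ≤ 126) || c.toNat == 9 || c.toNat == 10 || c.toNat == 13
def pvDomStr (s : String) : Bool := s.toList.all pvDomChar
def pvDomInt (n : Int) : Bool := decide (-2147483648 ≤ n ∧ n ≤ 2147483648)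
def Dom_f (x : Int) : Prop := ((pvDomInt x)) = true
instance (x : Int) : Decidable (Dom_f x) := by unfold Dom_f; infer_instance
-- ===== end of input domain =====

-- B replaces A's halving loop by a closed-form shift exponent read off y's bit length
-- and a single shift (objective: alternative, loop-free closed form).

-- ===== PORT A =====
-- A's while loop: while y > 10: y -= 1; parity branch; repeat.  The fuel argument
-- (y.toNat + 1 at the call site) only makes the recursion structural: each iteration
-- strictly decreases y.toNat, so the fuel never runs out on any input f passes in.
def fLoopA : Nat → Int → Int
  | 0, y => y
  | fuel + 1, y =>
    if y > 10 then
      let y1 := y - 1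
      let y2 := if PySem.Int.mod y1 2 = 1 then y1 - PySem.Int.floordiv y1 2
                else PySem.Int.floordiv y1 2
      fLoopA fuel y2
    else y

def f (x : Int) : Int :=
  let y := x * x
  if x * x > 42 then fLoopA (y.toNat + 1) y else y

-- ===== PORT B =====
-- Python's y.bit_length() for y > 0 is Nat.log2 y + 1
def f_alt (x : Int) : Int :=
  let y := x * x
  if y ≤ 42 then y
  else
    let n := y.toNat
    let k := (Nat.log2 n + 1) - 4
    let v := n >>> k
    ((if v ≤ 10 then v else v >>> 1 : Nat) : Int)

-- ===== PRECONDITION & SPEC =====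
def Spec_f (x : Int) (out : Int) : Prop := out = f_alt x
instance (x : Int) (out : Int) : Decidable (Spec_f x out) := by unfold Spec_f; infer_instance

-- ===== CLAIM (what is proved, stated in full; the proofs are below) =====
def Claim_equal_f : Prop := ∀ (x : Int), Dom_f x → Spec_f x (f x)

-- ===== LEMMAS AND PROOFS =====

-- shifting is antitone in the exponent
theorem shiftRight_antitone (n : Nat) {a b : Nat} (h : a ≤ b) : n >>> b ≤ n >>> a := by
  simp only [Nat.shiftRight_eq_div_pow]
  exact Nat.div_le_div_left (Nat.pow_le_pow_right (by norm_num) h) (Nat.pow_pos (by norm_num))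

theorem fLoopA_small (fuel : Nat) (y : Int) (h : ¬ y > 10) : fLoopA fuel y = y := by
  cases fuel with
  | zero => rfl
  | succ fuel => rw [fLoopA, if_neg h]

-- A's loop, characterised: if j ≥ 1 is the least exponent with n >>> j ≤ 10 and the
-- fuel covers j iterations, the loop returns n >>> j
theorem fLoopA_eq_shift (fuel n j : Nat) (hn : n > 10) (hj : 1 ≤ j) (hf : j ≤ fuel)
    (h1 : n >>> j ≤ 10) (h2 : 10 < n >>> (j - 1)) :
    fLoopA fuel (n : Int) = ((n >>> j : Nat) : Int) := by
  induction j generalizing n fuel with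
  | zero => omega
  | succ j ih =>
    obtain ⟨fuel, rfl⟩ : ∃ f', fuel = f' + 1 := ⟨fuel - 1, by omega⟩
    rw [fLoopA, if_pos (by exact_mod_cast hn)]
    have e2 : ((n : Int) - 1).fdiv 2 = ((n : Int) - 1) / 2 := by rw [Int.fdiv_eq_ediv]; norm_num
    have e3 : ((n : Int) - 1).fmod 2 = ((n : Int) - 1) % 2 := by rw [Int.fmod_eq_emod]; norm_num
    have hbody :
        (if PySem.Int.mod ((n : Int) - 1) 2 = 1 then
            ((n : Int) - 1) - PySem.Int.floordiv ((n : Int) - 1) 2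
          else PySem.Int.floordiv ((n : Int) - 1) 2) = ((n >>> 1 : Nat) : Int) := by
      simp only [PySem.Int.mod, PySem.Int.floordiv, e2, e3, Nat.shiftRight_one]
      split <;> omega
    simp only [hbody]
    have hs : ∀ i, (n >>> 1) >>> i = n >>> (i + 1) := by
      intro i; rw [← Nat.shiftRight_add, Nat.add_comm]
    cases Nat.eq_or_lt_of_le hj with
    | inl h0 =>
      -- j + 1 = 1: one halving suffices and the loop exits
      have hj0 : j = 0 := by omega
      subst hj0
      rw [fLoopA_small fuel _ (by exact_mod_cast Nat.not_lt.mpr h1)]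
    | inr hlt =>
      -- j + 1 ≥ 2: the halved value still exceeds 10; recurse
      have hj1 : 1 ≤ j := by omega
      have hm : 10 < n >>> 1 := lt_of_lt_of_le h2 (shiftRight_antitone n (by omega))
      have := ih fuel (n >>> 1) hm hj1 (by omega) (by rw [hs]; exact h1)
        (by rw [hs]; have e : j - 1 + 1 = j + 1 - 1 := by omega
            rw [e]; exact h2)
      rw [this, hs]

-- ===== VERDICT (by name: the statement is the Claim_ definition above) =====
theorem f_spec : Claim_equal_f := by
  intro x _
  unfold Spec_f f f_alt
  have hy : (0 : Int) ≤ x * x := mul_self_nonneg x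
  by_cases h : x * x > 42
  · rw [if_pos h, if_neg (by omega)]
    set n := (x * x).toNat with hn
    have hx : ((x * x).toNat : Int) = x * x := Int.toNat_of_nonneg hy
    have hn43 : 43 ≤ n := by omega
    set b := Nat.log2 n + 1 with hb
    have hlow : 2 ^ (b - 1) ≤ n := by
      simpa [hb] using Nat.log2_self_le (by omega : n ≠ 0)
    have hhigh : n < 2 ^ b := by
      simpa [hb] using Nat.lt_log2_self (n := n)
    have hb6 : 6 ≤ b := by
      by_contra hc
      have : n < 2 ^ 5 := lt_of_lt_of_le hhigh (Nat.pow_le_pow_right (by norm_num) (by omega))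
      omega
    have hbn : b ≤ n := by
      have h1 : b - 1 < 2 ^ (b - 1) := Nat.lt_two_pow_self
      omega
    change fLoopA (n + 1) (x * x) =
      ((if n >>> (b - 4) ≤ 10 then n >>> (b - 4) else (n >>> (b - 4)) >>> 1 : Nat) : Int)
    -- n >>> (b-5) ≥ 16 : the candidate exponent b-4 is never too large
    have hstep : 10 < n >>> (b - 5) := by
      have : 2 ^ (b - 5) * 16 ≤ n := by
        have : 2 ^ (b - 5) * 16 = 2 ^ (b - 1) := by
          rw [show (16 : Nat) = 2 ^ 4 from rfl, ← Nat.pow_add]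
          congr 1; omega
        omega
      have h16 : 16 ≤ n / 2 ^ (b - 5) := (Nat.le_div_iff_mul_le (by positivity)).mpr (by omega)
      rw [Nat.shiftRight_eq_div_pow]; omega
    rw [← hx]
    by_cases hv : n >>> (b - 4) ≤ 10
    · -- least exponent is b-4
      rw [if_pos hv]
      exact fLoopA_eq_shift (n + 1) n (b - 4) (by omega) (by omega) (by omega) hv
        (by have e : b - 4 - 1 = b - 5 := by omega
            rw [e]; exact hstep)
    · -- least exponent is b-3
      rw [if_neg hv]
      have hsm : n >>> (b - 3) ≤ 10 := by
        have hmul : n < 2 ^ (b - 3) * 8 := by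
          have : 2 ^ (b - 3) * 8 = 2 ^ b := by
            rw [show (8 : Nat) = 2 ^ 3 from rfl, ← Nat.pow_add]
            congr 1; omega
          omega
        have h8 : n / 2 ^ (b - 3) < 8 := Nat.div_lt_of_lt_mul (by omega)
        rw [Nat.shiftRight_eq_div_pow]; omega
      have hres : (n >>> (b - 4)) >>> 1 = n >>> (b - 3) := by
        rw [← Nat.shiftRight_add]
        congr 1; omega
      rw [hres]
      exact fLoopA_eq_shift (n + 1) n (b - 3) (by omega) (by omega) (by omega) hsm
        (by have e : b - 3 - 1 = b - 4 := by omega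
            rw [e]; omega)
  · rw [if_neg h, if_pos (by omega)]
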